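-- pv_equiv track=rewrite | github.com/marchartley/generation-terrain-procedural | Python_tests/dataAugmentationIslandGeneration.py | nbToAlpha
-- ===== SOURCE A (Python) =====
-- def nbToAlpha(x: int, nbChars: int = 4):
--     ret = ""
--     if x == 0:
--         ret = "A"
--     while x > 0:
--         x, r = divmod(x, 27)
--         ret = chr(ord("A") + r) + ret
--     if len(ret) < nbChars:
--         ret = ret + ("_" * (nbChars - len(ret)))
--     return ret
-- ===== SOURCE B (Python) =====
-- def nbToAlpha(x: int, nbChars: int = 4):
--     # count base-27 digits of x (0 for x <= 0)
--     k = 0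
--     y = x
--     while y > 0:
--         y //= 27
--         k += 1
--     if x == 0:
--         s = "A"
--     else:
--         s = ""
--         for i in range(k - 1, -1, -1):
--             s += chr(ord("A") + (x // 27 ** i) % 27)
--     if len(s) < nbChars:
--         s += "_" * (nbChars - len(s))
--     return s
-- ===== Notes on version B (the rewrite author's own statement) =====
-- stated objective: alternative
-- what changed: Replaces the destructive divmod-and-prepend loop with two passes: first count the base-27 digits, then build the string left-to-right by positional extraction (x // 27**i) % 27.
import Mathlib
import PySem

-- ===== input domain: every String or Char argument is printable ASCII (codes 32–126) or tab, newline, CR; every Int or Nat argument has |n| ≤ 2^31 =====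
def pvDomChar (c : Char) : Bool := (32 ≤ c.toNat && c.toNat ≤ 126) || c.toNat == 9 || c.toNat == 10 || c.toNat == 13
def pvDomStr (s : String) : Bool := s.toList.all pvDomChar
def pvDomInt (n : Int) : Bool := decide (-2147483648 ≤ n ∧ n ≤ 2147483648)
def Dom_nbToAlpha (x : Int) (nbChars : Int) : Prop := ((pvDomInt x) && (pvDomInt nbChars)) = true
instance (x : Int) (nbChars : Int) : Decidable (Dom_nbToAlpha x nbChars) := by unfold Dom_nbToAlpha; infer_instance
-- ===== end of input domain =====

-- B builds the digits in two passes (count digits, then extract each position left-to-right)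
-- instead of A's destructive divmod-and-prepend loop; same cost, different decomposition.

-- ===== PORT A =====

-- termination fact for the divmod loop: x // 27 < x for x > 0
theorem pvDiv27_lt (x : Int) (h : 0 < x) : (PySem.Int.floordiv x 27).toNat < x.toNat := by
  have h2 : PySem.Int.floordiv x 27 < x := by
    rw [PySem.Int.floordiv_lt_iff_lt_mul (by omega)]
    nlinarith
  have h3 : 0 ≤ PySem.Int.floordiv x 27 := by
    rw [PySem.Int.le_floordiv_iff_mul_le (by omega)]; omega
  omega

-- 'while x > 0: x, r = divmod(x, 27); ret = chr(ord("A")+r) + ret'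
def nbToAlphaLoop (x : Int) (ret : List Char) : List Char :=
  if h : 0 < x then
    nbToAlphaLoop (PySem.Int.floordiv x 27)
      (Char.ofNat (65 + (PySem.Int.mod x 27)).toNat :: ret)
  else ret
termination_by x.toNat
decreasing_by exact pvDiv27_lt x h

def nbToAlpha (x : Int) (nbChars : Int) : String :=
  let ret : List Char := if x = 0 then ['A'] else []
  let ret := nbToAlphaLoop x ret
  -- 'ret = ret + "_" * (nbChars - len(ret))' under 'len(ret) < nbChars' (count positive, so replicate is exact)
  let ret := if (ret.length : Int) < nbChars then ret ++ List.replicate (nbChars - ret.length).toNat '_' else ret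
  String.ofList ret

-- ===== PORT B =====

-- 'while y > 0: y //= 27; k += 1'
def altCount (y : Int) : Int :=
  if 0 < y then altCount (PySem.Int.floordiv y 27) + 1 else 0
termination_by y.toNat
decreasing_by exact pvDiv27_lt y (by omega)

-- 'for i in range(k-1, -1, -1): s += chr(ord("A") + (x // 27**i) % 27)'
def altBuild (x : Int) (k : Int) : List Char :=
  (PySem.List.pyRange (k - 1) (-1) (-1)).foldl
    (fun s i => s ++ [Char.ofNat (65 + PySem.Int.mod (PySem.Int.floordiv x (27 ^ i.toNat)) 27).toNat]) []

def nbToAlpha_alt (x : Int) (nbChars : Int) : String :=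
  let k := altCount x
  let s : List Char := if x = 0 then ['A'] else altBuild x k
  let s := if (s.length : Int) < nbChars then s ++ List.replicate (nbChars - s.length).toNat '_' else s
  String.ofList s

-- ===== PRECONDITION & SPEC =====
def Spec_nbToAlpha (x : Int) (nbChars : Int) (out : String) : Prop := out = nbToAlpha_alt x nbChars
instance (x : Int) (nbChars : Int) (out : String) : Decidable (Spec_nbToAlpha x nbChars out) := by unfold Spec_nbToAlpha; infer_instance

-- ===== CLAIM (what is proved, stated in full; the proofs are below) =====
def Claim_equal_nbToAlpha : Prop := ∀ (x : Int) (nbChars : Int), Dom_nbToAlpha x nbChars → Spec_nbToAlpha x nbChars (nbToAlpha x nbChars)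

-- ===== LEMMAS AND PROOFS =====

-- the digits of x, most significant first (reference characterisation of A's loop)
def pvDigits (x : Int) : List Char :=
  if 0 < x then
    pvDigits (PySem.Int.floordiv x 27) ++ [Char.ofNat (65 + (PySem.Int.mod x 27)).toNat]
  else []
termination_by x.toNat
decreasing_by exact pvDiv27_lt x (by omega)

theorem nbToAlphaLoop_eq (x : Int) (ret : List Char) :
    nbToAlphaLoop x ret = pvDigits x ++ ret := by
  by_cases h : 0 < x
  · rw [nbToAlphaLoop, pvDigits, dif_pos h, if_pos h,
      nbToAlphaLoop_eq (PySem.Int.floordiv x 27)]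
    simp
  · rw [nbToAlphaLoop, pvDigits, dif_neg h, if_neg h]; simp
termination_by x.toNat
decreasing_by exact pvDiv27_lt x h

theorem altCount_nonneg (x : Int) : 0 ≤ altCount x := by
  by_cases h : 0 < x
  · rw [altCount, if_pos h]
    have := altCount_nonneg (PySem.Int.floordiv x 27); omega
  · rw [altCount, if_neg h]
termination_by x.toNat
decreasing_by exact pvDiv27_lt x h

theorem floordiv_floordiv (x : Int) (m : Nat) :
    PySem.Int.floordiv (PySem.Int.floordiv x 27) (27 ^ m) = PySem.Int.floordiv x (27 ^ (m + 1)) := by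
  rw [PySem.Int.floordiv_eq_ediv_of_pos (b := 27) (by omega),
    PySem.Int.floordiv_eq_ediv_of_pos (by positivity),
    PySem.Int.floordiv_eq_ediv_of_pos (by positivity),
    Int.ediv_ediv_of_nonneg (by omega), pow_succ]
  ring_nf

theorem altBuild_eq_map (x : Int) (k : Nat) :
    altBuild x k = (List.range k).map
      (fun j => Char.ofNat (65 + PySem.Int.mod (PySem.Int.floordiv x (27 ^ (k - 1 - j))) 27).toNat) := by
  unfold altBuild
  rw [PySem.List.foldl_append_singleton_eq_map, PySem.List.pyRange_neg_one]
  have hk : ((k : Int) - 1 - (-1)).toNat = k := by omega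
  rw [hk]
  simp only [List.nil_append, List.map_map]
  apply List.map_congr_left
  intro j hj
  simp only [List.mem_range] at hj
  simp only [Function.comp_apply]
  have he : ((k : Int) - 1 - (j : Int)).toNat = k - 1 - j := by omega
  rw [he]

theorem pvDigits_eq_altBuild (x : Int) (hx : 0 < x) :
    altBuild x (altCount x) = pvDigits x := by
  have hc : altCount x = altCount (PySem.Int.floordiv x 27) + 1 := by
    rw [altCount, if_pos hx]
  have hnn := altCount_nonneg (PySem.Int.floordiv x 27)
  -- pass to Nat counts
  set k' : Nat := (altCount (PySem.Int.floordiv x 27)).toNat with hk'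
  have hkk : altCount x = ((k' + 1 : Nat) : Int) := by omega
  rw [hkk, altBuild_eq_map, pvDigits, if_pos hx, List.range_succ, List.map_append]
  congr 1
  · -- leading digits come from x // 27
    by_cases h' : 0 < PySem.Int.floordiv x 27
    · rw [← pvDigits_eq_altBuild (PySem.Int.floordiv x 27) h']
      have hc' : altCount (PySem.Int.floordiv x 27) = ((k' : Nat) : Int) := by omega
      rw [hc', altBuild_eq_map]
      apply List.map_congr_left
      intro j hj
      simp only [List.mem_range] at hj
      have he : k' + 1 - 1 - j = (k' - 1 - j) + 1 := by omega
      rw [he, ← floordiv_floordiv]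
    · -- x // 27 ≤ 0, so k' = 0 and both sides are []
      have hz : altCount (PySem.Int.floordiv x 27) = 0 := by
        rw [altCount, if_neg h']
      have : k' = 0 := by omega
      rw [this, pvDigits, if_neg h']
      simp
  · -- last digit: j = k', position 0, 27^0 = 1
    simp
termination_by x.toNat
decreasing_by exact pvDiv27_lt x hx

-- ===== VERDICT (by name: the statement is the Claim_ definition above) =====
-- the two digit-building cores agree
theorem core_eq (x : Int) :
    nbToAlphaLoop x (if x = 0 then ['A'] else []) =
      (if x = 0 then ['A'] else altBuild x (altCount x)) := by
  rw [nbToAlphaLoop_eq]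
  by_cases hx0 : x = 0
  · subst hx0
    rw [pvDigits]
    simp
  · simp only [if_neg hx0, List.append_nil]
    by_cases hx : 0 < x
    · rw [pvDigits_eq_altBuild x hx]
    · -- x < 0: no digits on either side
      have hc : altCount x = 0 := by rw [altCount, if_neg hx]
      rw [pvDigits, if_neg hx, hc]
      unfold altBuild
      rw [PySem.List.pyRange_neg_one_eq_nil (by omega)]
      rfl

theorem nbToAlpha_spec : Claim_equal_nbToAlpha := by
  intro x nbChars _
  unfold Spec_nbToAlpha nbToAlpha nbToAlpha_alt
  simp only [core_eq]
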